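-- pv_equiv track=rewrite | github.com/pca006132/command-block-simulator | run_command.py | parse_selector
-- ===== SOURCE A (Python) =====
-- def parse_selector(selector):
--     arguments = selector[3:-1].split(',')
--     name = ''
--     tag = None
--     for i in arguments:
--         if i.startswith('name='):
--             name = i[5:]
--         elif i.startswith('tag='):
--             tag = i[4:]
--     return name, tag
-- ===== SOURCE B (Python) =====
-- def parse_selector(selector):
--     d = {}
--     for arg in selector[3:-1].split(','):
--         parts = arg.split('=', 1)
--         if len(parts) == 2:
--             d[parts[0]] = parts[1]
--     return d.get('name', ''), d.get('tag')
-- ===== Notes on version B (the rewrite author's own statement) =====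
-- stated objective: idiomatic
-- what changed: B builds a key->value dict from each comma-separated argument split once at its first equals sign and extracts the two fields by dict lookup with defaults, instead of scanning every argument against two fixed prefixes with accumulator variables.
import Mathlib
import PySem

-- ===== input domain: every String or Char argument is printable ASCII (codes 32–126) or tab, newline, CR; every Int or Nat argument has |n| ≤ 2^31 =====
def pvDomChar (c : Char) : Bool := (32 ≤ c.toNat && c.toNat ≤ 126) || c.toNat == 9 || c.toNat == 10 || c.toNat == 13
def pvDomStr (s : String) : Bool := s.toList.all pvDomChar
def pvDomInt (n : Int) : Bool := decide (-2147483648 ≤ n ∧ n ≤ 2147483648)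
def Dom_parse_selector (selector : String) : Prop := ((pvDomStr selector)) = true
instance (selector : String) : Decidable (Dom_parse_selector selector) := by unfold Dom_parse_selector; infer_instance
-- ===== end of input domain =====

-- B builds a key->value dict from split('=',1) of each argument and extracts the two fields by lookup; same cost, more idiomatic.

-- ===== PORT A =====
-- A: slice selector[3:-1], split on ',', scan each argument against the prefixes 'name=' / 'tag='.
def parse_selector (selector : String) : String × Option String :=
  let arguments := PySem.Chars.splitOn (PySem.List.slice selector.toList (some 3) (some (-1))) [',']
  let r := arguments.foldl
    (fun (st : List Char × Option (List Char)) i =>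
      if PySem.Chars.startswith i ['n','a','m','e','='] then
        (PySem.List.slice i (some 5) none, st.2)
      else if PySem.Chars.startswith i ['t','a','g','='] then
        (st.1, some (PySem.List.slice i (some 4) none))
      else st)
    (([] : List Char), (none : Option (List Char)))
  (String.ofList r.1, r.2.map String.ofList)

-- ===== PORT B =====
-- B: build a key->value dict from arg.split('=', 1) (only when a separator is present), then look up.
def parse_selector_alt (selector : String) : String × Option String :=
  let arguments := PySem.Chars.splitOn (PySem.List.slice selector.toList (some 3) (some (-1))) [',']
  let d := arguments.foldl
    (fun (d : PySem.Dict (List Char) (List Char)) arg =>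
      match PySem.Chars.splitOnMax arg ['='] 1 with
      | [k, v] => d.insert k v
      | _ => d)
    PySem.Dict.empty
  (String.ofList (d.getD ['n','a','m','e'] []),
   (d.get? ['t','a','g']).map String.ofList)

-- ===== PRECONDITION & SPEC =====
def Spec_parse_selector (selector : String) (out : String × Option String) : Prop := out = parse_selector_alt selector
instance (selector : String) (out : String × Option String) : Decidable (Spec_parse_selector selector out) := by unfold Spec_parse_selector; infer_instance

-- ===== CLAIM (what is proved, stated in full; the proofs are below) =====
def Claim_equal_parse_selector : Prop := ∀ (selector : String), Dom_parse_selector selector → Spec_parse_selector selector (parse_selector selector)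

-- ===== LEMMAS AND PROOFS =====

-- characterization of splitOnMax _ ['='] 1 (= arg.split('=', 1)), then a fold invariant
-- relating A's accumulator pair to B's dict.
theorem pv_go0 (l : List Char) (fuel : Nat) (cur : List Char) (acc : List (List Char))
    (hf : 0 < fuel) :
    PySem.Chars.splitOnMax.go ['='] fuel 0 l cur acc = ((cur.reverse ++ l) :: acc).reverse := by
  obtain ⟨f, rfl⟩ := Nat.exists_eq_succ_of_ne_zero (Nat.pos_iff_ne_zero.mp hf)
  cases l with
  | nil => simp [PySem.Chars.splitOnMax.go]
  | cons c rest => simp [PySem.Chars.splitOnMax.go]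

theorem pv_go1 (l : List Char) : ∀ (fuel : Nat) (cur : List Char) (acc : List (List Char)),
    l.length < fuel →
    PySem.Chars.splitOnMax.go ['='] fuel 1 l cur acc =
      if '=' ∈ l then
        acc.reverse ++ [cur.reverse ++ l.takeWhile (· ≠ '='),
                        l.drop ((l.takeWhile (· ≠ '=')).length + 1)]
      else acc.reverse ++ [cur.reverse ++ l] := by
  induction l with
  | nil =>
    intro fuel cur acc hf
    obtain ⟨f, rfl⟩ := Nat.exists_eq_succ_of_ne_zero (Nat.pos_iff_ne_zero.mp hf)
    simp [PySem.Chars.splitOnMax.go]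
  | cons c rest ih =>
    intro fuel cur acc hf
    obtain ⟨f, rfl⟩ : ∃ f, fuel = f + 1 := ⟨fuel - 1, by omega⟩
    have hrest : rest.length < f := by
      simp only [List.length_cons] at hf; omega
    by_cases hc : c = '='
    · subst hc
      simp only [PySem.Chars.splitOnMax.go]
      rw [if_neg (by decide : ¬(1:Nat) = 0)]
      rw [if_pos (by simp [List.isPrefixOf])]
      rw [pv_go0 _ _ _ _ (by omega)]
      simp [List.takeWhile]
    · simp only [PySem.Chars.splitOnMax.go]
      rw [if_neg (by decide : ¬(1:Nat) = 0)]
      rw [if_neg (by simp [List.isPrefixOf]; exact fun h => hc h.symm)]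
      rw [ih f (c :: cur) acc hrest]
      by_cases hm : '=' ∈ rest
      · simp [hm, Ne.symm hc, hc]
      · simp [hm, Ne.symm hc]

theorem pv_split1 (i : List Char) :
    PySem.Chars.splitOnMax i ['='] 1 =
      if '=' ∈ i then
        [i.takeWhile (· ≠ '='), i.drop ((i.takeWhile (· ≠ '=')).length + 1)]
      else [i] := by
  unfold PySem.Chars.splitOnMax
  rw [if_neg (by decide : ¬(1:Int) < 0)]
  rw [show ((1:Int).toNat) = 1 from rfl, pv_go1 i (i.length + 1) [] [] (by omega)]
  split <;> simp

theorem pv_takeWhile_decomp (q r : List Char) (hq : '=' ∉ q) :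
    (q ++ '='::r).takeWhile (· ≠ '=') = q := by
  induction q with
  | nil => simp
  | cons a q ih =>
    simp only [List.mem_cons, not_or] at hq
    rw [List.cons_append, List.takeWhile_cons,
      if_pos (by simp; exact fun h => hq.1 h.symm), ih hq.2]

theorem pv_drop_decomp (q r : List Char) : (q ++ '='::r).drop (q.length + 1) = r := by
  induction q with
  | nil => simp
  | cons a q ih => simp [ih]

theorem pv_exists_decomp (i : List Char) (h : '=' ∈ i) :
    ∃ q r, i = q ++ '='::r ∧ '=' ∉ q := by
  induction i with
  | nil => simp at h
  | cons c rest ih =>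
    by_cases hc : c = '='
    · exact ⟨[], rest, by simp [hc], by simp⟩
    · have h' : '=' ∈ rest := by
        rcases List.mem_cons.mp h with h1 | h1
        · exact absurd h1.symm hc
        · exact h1
      obtain ⟨q, r, rfl, hq⟩ := ih h'
      exact ⟨c :: q, r, rfl, by simp [hq, Ne.symm hc]⟩

theorem pv_prefix_iff (q : List Char) : ∀ (p r : List Char), '=' ∉ q → '=' ∉ p →
    ((p ++ ['=']) <+: (q ++ '='::r) ↔ p = q) := by
  induction q with
  | nil =>
    intro p r _ hp
    cases p with
    | nil => simp
    | cons a p' =>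
      simp only [List.mem_cons, not_or] at hp
      simp [List.cons_prefix_cons, Ne.symm hp.1]
  | cons b q' ih =>
    intro p r hq hp
    simp only [List.mem_cons, not_or] at hq
    cases p with
    | nil => simp [List.cons_prefix_cons, hq.1]
    | cons a p' =>
      simp only [List.mem_cons, not_or] at hp
      simp [List.cons_prefix_cons, ih p' r hq.2 hp.2]

theorem pv_split1_decomp (q r : List Char) (hq : '=' ∉ q) :
    PySem.Chars.splitOnMax (q ++ '='::r) ['='] 1 = [q, r] := by
  rw [pv_split1, if_pos (by simp), pv_takeWhile_decomp q r hq]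
  rw [pv_drop_decomp]

theorem pv_fold (args : List (List Char)) :
    ∀ (d : PySem.Dict (List Char) (List Char)) (st : List Char × Option (List Char)),
    d.getD ['n','a','m','e'] [] = st.1 → d.get? ['t','a','g'] = st.2 →
    (args.foldl (fun d arg => match PySem.Chars.splitOnMax arg ['='] 1 with
        | [k, v] => d.insert k v
        | _ => d) d).getD ['n','a','m','e'] [] =
      (args.foldl (fun st i =>
        if PySem.Chars.startswith i ['n','a','m','e','='] then (PySem.List.slice i (some 5) none, st.2)
        else if PySem.Chars.startswith i ['t','a','g','='] then (st.1, some (PySem.List.slice i (some 4) none))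
        else st) st).1 ∧
    (args.foldl (fun d arg => match PySem.Chars.splitOnMax arg ['='] 1 with
        | [k, v] => d.insert k v
        | _ => d) d).get? ['t','a','g'] =
      (args.foldl (fun st i =>
        if PySem.Chars.startswith i ['n','a','m','e','='] then (PySem.List.slice i (some 5) none, st.2)
        else if PySem.Chars.startswith i ['t','a','g','='] then (st.1, some (PySem.List.slice i (some 4) none))
        else st) st).2 := by
  induction args with
  | nil => intro d st h1 h2; exact ⟨h1, h2⟩
  | cons i rest ih =>
    intro d st h1 h2
    simp only [List.foldl_cons]
    by_cases hm : '=' ∈ i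
    · obtain ⟨q, r, rfl, hq⟩ := pv_exists_decomp i hm
      rw [pv_split1_decomp q r hq]
      have hslice5 : PySem.List.slice (q ++ '='::r) (some 5) none = (q ++ '='::r).drop 5 :=
        PySem.List.slice_from _ (by norm_num)
      have hslice4 : PySem.List.slice (q ++ '='::r) (some 4) none = (q ++ '='::r).drop 4 :=
        PySem.List.slice_from _ (by norm_num)
      by_cases hname : q = ['n','a','m','e']
      · subst hname
        rw [if_pos (by
          rw [PySem.Chars.startswith_iff]
          exact (pv_prefix_iff _ _ r hq (by decide)).mpr rfl)]
        apply ih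
        · rw [PySem.Dict.getD_insert, if_pos rfl, hslice5]
          exact (pv_drop_decomp ['n','a','m','e'] r).symm
        · rw [PySem.Dict.get?_insert, if_neg (by decide)]
          exact h2
      · rw [if_neg (by
          rw [PySem.Chars.startswith_iff]
          exact fun hpf => hname ((pv_prefix_iff q _ r hq (by decide)).mp hpf).symm)]
        by_cases htag : q = ['t','a','g']
        · subst htag
          rw [if_pos (by
            rw [PySem.Chars.startswith_iff]
            exact (pv_prefix_iff _ _ r hq (by decide)).mpr rfl)]
          apply ih
          · rw [PySem.Dict.getD_insert, if_neg (by decide)]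
            exact h1
          · rw [PySem.Dict.get?_insert, if_pos rfl, hslice4]
            exact congrArg some (pv_drop_decomp ['t','a','g'] r).symm
        · rw [if_neg (by
            rw [PySem.Chars.startswith_iff]
            exact fun hpf => htag ((pv_prefix_iff q _ r hq (by decide)).mp hpf).symm)]
          apply ih
          · rw [PySem.Dict.getD_insert, if_neg (fun h => hname h.symm)]
            exact h1
          · rw [PySem.Dict.get?_insert, if_neg (fun h => htag h.symm)]
            exact h2
    · rw [pv_split1 i, if_neg hm]
      have hns : ∀ p : List Char, '=' ∈ p → PySem.Chars.startswith i p = false := by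
        intro p hp
        rw [Bool.eq_false_iff]
        intro hs
        rw [PySem.Chars.startswith_iff] at hs
        exact hm (hs.subset hp)
      rw [hns _ (by decide), hns _ (by decide)]
      simp only [Bool.false_eq_true, if_false]
      exact ih d st h1 h2

-- ===== VERDICT (by name: the statement is the Claim_ definition above) =====
theorem parse_selector_spec : Claim_equal_parse_selector := by
  intro selector _
  unfold Spec_parse_selector
  simp only [parse_selector, parse_selector_alt]
  obtain ⟨h1, h2⟩ := pv_fold
    (PySem.Chars.splitOn (PySem.List.slice selector.toList (some 3) (some (-1))) [','])
    PySem.Dict.empty (([] : List Char), (none : Option (List Char)))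
    (by rw [PySem.Dict.getD_empty]) (by rw [PySem.Dict.get?_empty])
  rw [h1, h2]
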